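-- pv_equiv track=rewrite | github.com/JerryHao2001/thesis-scico-cdcr | preprocess/build_signature_coref_new.py | best_pos_for_mention
-- ===== SOURCE A (Python) =====
-- from typing import List, Tuple, Dict, Optional
--
-- def best_pos_for_mention(scico_spans: List[Tuple[int,int]],
--                          gs: int, ge: int,
--                          delta_pos: int, delta_len: int) -> Tuple[int,int]:
--     """
--     Given all SciCo spans for a mention and a gold span (gs,ge),
--     return (pos_cls, pos_dist) where:
--       - pos_cls in {0,2} (0 = within fuzz window, 2 = outside)
--       - pos_dist = |start_diff| + |len_diff| for the best span
--     """
--     if not scico_spans: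
--         return 2, 10**9
--     len_g = ge - gs
--     best_cls = 2
--     best_dist = 10**9
--     for (ps, pe) in scico_spans:
--         len_p = pe - ps
--         pos_ok = (abs(ps - gs) <= delta_pos and
--                   abs(len_p - len_g) <= delta_len)
--         pos_dist = abs(ps - gs) + abs(len_p - len_g)
--         cls = 0 if pos_ok else 2
--         if (cls, pos_dist) < (best_cls, best_dist):
--             best_cls, best_dist = cls, pos_dist
--     return best_cls, best_dist
-- ===== SOURCE B (Python) =====
-- def best_pos_for_mention(scico_spans, gs, ge, delta_pos, delta_len):
--     # Filter-then-min decomposition: split each span into its (start-diff, len-diff)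
--     # components once, take the min over the in-window group if any, otherwise the
--     # min over all distances with INF as the default (which also covers no spans).
--     INF = 10 ** 9
--     len_g = ge - gs
--     pairs = [(abs(ps - gs), abs((pe - ps) - len_g)) for ps, pe in scico_spans]
--     in_window = [dp + dl for dp, dl in pairs if dp <= delta_pos and dl <= delta_len]
--     if in_window:
--         return 0, min(in_window)
--     return 2, min([INF] + [dp + dl for dp, dl in pairs])
-- ===== Notes on version B (the rewrite author's own statement) =====
-- stated objective: simpler
-- what changed: Replaces the single lexicographic-min update loop over (cls,dist) pairs with a filter-then-min decomposition: project each span to its (start-diff, len-diff) components, return the min over the in-window group if non-empty, else the min over all distances with the INF default (which also subsumes the empty-list case, so B needs no guard).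
import Mathlib
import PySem

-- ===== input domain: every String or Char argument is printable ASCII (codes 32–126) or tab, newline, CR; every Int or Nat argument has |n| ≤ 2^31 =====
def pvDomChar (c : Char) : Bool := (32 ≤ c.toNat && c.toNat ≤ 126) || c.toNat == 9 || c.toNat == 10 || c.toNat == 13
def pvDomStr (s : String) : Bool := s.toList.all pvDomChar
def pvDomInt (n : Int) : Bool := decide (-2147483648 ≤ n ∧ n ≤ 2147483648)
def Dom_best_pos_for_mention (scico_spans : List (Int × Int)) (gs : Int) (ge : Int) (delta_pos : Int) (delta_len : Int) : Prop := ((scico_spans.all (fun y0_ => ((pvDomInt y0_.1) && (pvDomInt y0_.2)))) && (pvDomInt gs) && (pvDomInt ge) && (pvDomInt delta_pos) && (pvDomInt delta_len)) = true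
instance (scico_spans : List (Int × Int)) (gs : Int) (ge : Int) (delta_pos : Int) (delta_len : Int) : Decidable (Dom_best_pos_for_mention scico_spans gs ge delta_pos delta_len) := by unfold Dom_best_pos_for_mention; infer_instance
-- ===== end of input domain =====

-- B replaces A's single lexicographic-min update loop by a filter-then-min decomposition
-- (min over the in-window group if any, else min over all distances with INF default);
-- objective: simpler. Equivalence is exact on the whole domain.

-- ===== PORT A =====
-- A's loop body: tuple comparison (cls, pos_dist) < (best_cls, best_dist) is Python's
-- strict lexicographic order, transcribed literally.
def pvStepA (gs len_g delta_pos delta_len : Int) (best : Int × Int) (p : Int × Int) : Int × Int :=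
  let len_p := p.2 - p.1
  let pos_ok := |p.1 - gs| ≤ delta_pos ∧ |len_p - len_g| ≤ delta_len
  let pos_dist := |p.1 - gs| + |len_p - len_g|
  let cls : Int := if pos_ok then 0 else 2
  if cls < best.1 ∨ (cls = best.1 ∧ pos_dist < best.2) then (cls, pos_dist) else best

def best_pos_for_mention (scico_spans : List (Int × Int)) (gs : Int) (ge : Int) (delta_pos : Int) (delta_len : Int) : Int × Int :=
  if scico_spans = [] then (2, 10 ^ 9)
  else
    let len_g := ge - gs
    scico_spans.foldl (pvStepA gs len_g delta_pos delta_len) (2, 10 ^ 9)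

-- ===== PORT B =====
def best_pos_for_mention_alt (scico_spans : List (Int × Int)) (gs : Int) (ge : Int) (delta_pos : Int) (delta_len : Int) : Int × Int :=
  let INF : Int := 10 ^ 9
  let len_g := ge - gs
  let pairs := scico_spans.map (fun p : Int × Int => (|p.1 - gs|, |(p.2 - p.1) - len_g|))
  let in_window := (pairs.filter (fun q => decide (q.1 ≤ delta_pos) && decide (q.2 ≤ delta_len))).map (fun q => q.1 + q.2)
  if in_window ≠ [] then
    (0, (PySem.List.min? in_window (fun x => x)).getD 0)
  else
    (2, (PySem.List.min? (INF :: pairs.map (fun q => q.1 + q.2)) (fun x => x)).getD 0)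

-- ===== PRECONDITION & SPEC =====
def Spec_best_pos_for_mention (scico_spans : List (Int × Int)) (gs : Int) (ge : Int) (delta_pos : Int) (delta_len : Int) (out : Int × Int) : Prop := out = best_pos_for_mention_alt scico_spans gs ge delta_pos delta_len
instance (scico_spans : List (Int × Int)) (gs : Int) (ge : Int) (delta_pos : Int) (delta_len : Int) (out : Int × Int) : Decidable (Spec_best_pos_for_mention scico_spans gs ge delta_pos delta_len out) := by unfold Spec_best_pos_for_mention; infer_instance

-- ===== CLAIM (what is proved, stated in full; the proofs are below) =====
def Claim_equal_best_pos_for_mention : Prop := ∀ (scico_spans : List (Int × Int)) (gs : Int) (ge : Int) (delta_pos : Int) (delta_len : Int), Dom_best_pos_for_mention scico_spans gs ge delta_pos delta_len → Spec_best_pos_for_mention scico_spans gs ge delta_pos delta_len (best_pos_for_mention scico_spans gs ge delta_pos delta_len)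

-- ===== LEMMAS AND PROOFS =====

-- distance and in-window test of a span, as used by both programs
def pvDist (gs len_g : Int) (p : Int × Int) : Int := |p.1 - gs| + |(p.2 - p.1) - len_g|
def pvOk (gs len_g delta_pos delta_len : Int) (p : Int × Int) : Bool :=
  decide (|p.1 - gs| ≤ delta_pos) && decide (|(p.2 - p.1) - len_g| ≤ delta_len)

-- distances of the in-window spans, and of all spans
def pvOkd (gs len_g delta_pos delta_len : Int) (l : List (Int × Int)) : List Int :=
  (l.filter (pvOk gs len_g delta_pos delta_len)).map (pvDist gs len_g)
def pvAlld (gs len_g : Int) (l : List (Int × Int)) : List Int := l.map (pvDist gs len_g)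

-- min as the conditional update A's loop performs
lemma pv_min_eq_ite (a b : Int) : min a b = if b < a then b else a := by
  rw [Int.min_def]; split_ifs <;> omega

-- A's loop from a state with class 0: only in-window spans can update, running min of their distances
lemma foldl_stepA_zero (gs len_g delta_pos delta_len : Int) (l : List (Int × Int)) :
    ∀ bd : Int, l.foldl (pvStepA gs len_g delta_pos delta_len) (0, bd)
      = (0, (pvOkd gs len_g delta_pos delta_len l).foldl min bd) := by
  induction l with
  | nil => intro bd; simp [pvOkd]
  | cons p t ih =>
    intro bd
    by_cases h : |p.1 - gs| ≤ delta_pos ∧ |(p.2 - p.1) - len_g| ≤ delta_len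
    · have hok : pvOk gs len_g delta_pos delta_len p = true := by
        simp [pvOk, h.1, h.2]
      have hstep : pvStepA gs len_g delta_pos delta_len (0, bd) p
          = (0, min bd (pvDist gs len_g p)) := by
        simp only [pvStepA, if_pos h, pvDist]
        norm_num
        rw [pv_min_eq_ite]
        split_ifs <;> rfl
      simp only [List.foldl_cons, hstep]
      rw [ih (min bd (pvDist gs len_g p))]
      simp [pvOkd, hok]
    · have hok : pvOk gs len_g delta_pos delta_len p = false := by
        simp [pvOk]; omega
      have hstep : pvStepA gs len_g delta_pos delta_len (0, bd) p = (0, bd) := by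
        simp only [pvStepA, if_neg h]
        norm_num
      simp only [List.foldl_cons, hstep]
      rw [ih bd]
      simp [pvOkd, hok]

-- A's loop from a state with class 2: first in-window span switches to class 0,
-- otherwise the state tracks the running min over all distances
lemma foldl_stepA_two (gs len_g delta_pos delta_len : Int) (l : List (Int × Int)) :
    ∀ bd : Int, l.foldl (pvStepA gs len_g delta_pos delta_len) (2, bd)
      = (match pvOkd gs len_g delta_pos delta_len l with
         | [] => (2, (pvAlld gs len_g l).foldl min bd)
         | d :: ds => (0, ds.foldl min d)) := by
  induction l with
  | nil => intro bd; simp [pvOkd, pvAlld]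
  | cons p t ih =>
    intro bd
    by_cases h : |p.1 - gs| ≤ delta_pos ∧ |(p.2 - p.1) - len_g| ≤ delta_len
    · have hok : pvOk gs len_g delta_pos delta_len p = true := by
        simp [pvOk, h.1, h.2]
      have hstep : pvStepA gs len_g delta_pos delta_len (2, bd) p
          = (0, pvDist gs len_g p) := by
        simp only [pvStepA, if_pos h, pvDist]
        norm_num
      simp only [List.foldl_cons, hstep]
      rw [foldl_stepA_zero gs len_g delta_pos delta_len t (pvDist gs len_g p)]
      simp [pvOkd, hok]
    · have hok : pvOk gs len_g delta_pos delta_len p = false := by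
        simp [pvOk]; omega
      have hstep : pvStepA gs len_g delta_pos delta_len (2, bd) p
          = (2, min bd (pvDist gs len_g p)) := by
        simp only [pvStepA, if_neg h, pvDist]
        norm_num
        rw [pv_min_eq_ite]
        split_ifs <;> rfl
      simp only [List.foldl_cons, hstep]
      rw [ih (min bd (pvDist gs len_g p))]
      simp [pvOkd, pvAlld, hok]

-- B's in-window list is exactly the distances of the in-window spans,
-- and its all-spans list is exactly all distances
lemma alt_lists (gs len_g delta_pos delta_len : Int) (l : List (Int × Int)) :
    ((l.map (fun p : Int × Int => (|p.1 - gs|, |(p.2 - p.1) - len_g|))).filter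
        (fun q => decide (q.1 ≤ delta_pos) && decide (q.2 ≤ delta_len))).map (fun q => q.1 + q.2)
      = pvOkd gs len_g delta_pos delta_len l
    ∧ (l.map (fun p : Int × Int => (|p.1 - gs|, |(p.2 - p.1) - len_g|))).map (fun q => q.1 + q.2)
      = pvAlld gs len_g l := by
  constructor
  · rw [List.filter_map, List.map_map]
    rfl
  · rw [List.map_map]
    rfl

-- ===== VERDICT (by name: the statement is the Claim_ definition above) =====
theorem best_pos_for_mention_spec : Claim_equal_best_pos_for_mention := by
  intro spans gs ge delta_pos delta_len _
  unfold Spec_best_pos_for_mention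
  unfold best_pos_for_mention best_pos_for_mention_alt
  obtain ⟨hin, hall⟩ := alt_lists gs (ge - gs) delta_pos delta_len spans
  simp only [hin, hall]
  by_cases hs : spans = []
  · subst hs
    simp [pvOkd, pvAlld, PySem.List.min?_id_cons]
  · rw [if_neg hs]
    rw [foldl_stepA_two gs (ge - gs) delta_pos delta_len spans (10 ^ 9)]
    cases hok : pvOkd gs (ge - gs) delta_pos delta_len spans with
    | nil => simp [PySem.List.min?_id_cons]
    | cons d ds => simp [PySem.List.min?_id_cons]
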